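-- pv_equiv track=rewrite | github.com/PoCInnovation/AI4UX | back/clutter.py | strip_flags
-- ===== SOURCE A (Python) =====
-- def strip_flags(page):
--     flags = ""
--     flag = False
--     for letter in page:
--         if (letter == '<'):
--             flag = True
--         if (flag and (letter == '/' or letter == ' ')):
--             flag = False
--             flags += '>'
--         if (flag):
--             flags += letter
--         if (letter == '>'):
--             flag = False
--     return flags
-- ===== SOURCE B (Python) =====
-- def strip_flags(page):
--     n = len(page)
--     res = []
--     i = 0
--     while i < n:
--         if page[i] != '<':
--             i += 1
--             continue
--         # tag start: copy chars until a terminator '/', ' ' or '>', then emit '>'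
--         j = i
--         while j < n and page[j] not in ('/', ' ', '>'):
--             res.append(page[j])
--             j += 1
--         if j < n:
--             res.append('>')
--             i = j + 1
--         else:
--             i = j
--     return ''.join(res)
-- ===== Notes on version B (the rewrite author's own statement) =====
-- stated objective: alternative
-- what changed: Replaces A's single character-by-character pass carrying a boolean 'inside-tag' flag with a two-level index scan: an outer loop skipping to the next '<' and an inner scan copying the tag name until a terminator '/', ' ' or '>' (emitting '>'), with unterminated tags getting no '>'.
import Mathlib
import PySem

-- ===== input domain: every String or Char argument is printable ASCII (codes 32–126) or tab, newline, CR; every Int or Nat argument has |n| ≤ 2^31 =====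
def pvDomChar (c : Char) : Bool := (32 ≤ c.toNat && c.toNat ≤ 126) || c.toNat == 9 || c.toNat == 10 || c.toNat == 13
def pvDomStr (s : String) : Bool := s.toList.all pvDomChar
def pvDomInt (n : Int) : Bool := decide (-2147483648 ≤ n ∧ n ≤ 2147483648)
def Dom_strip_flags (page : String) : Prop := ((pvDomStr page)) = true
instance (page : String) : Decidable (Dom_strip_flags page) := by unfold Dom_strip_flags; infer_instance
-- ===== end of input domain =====

-- B replaces A's flag-carrying single pass by an outer skip-to-'<' loop with an inner tag-name scan (alternative decomposition, same cost).

-- ===== PORT A =====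
-- one step of A's for-loop: state is (flags so far, flag)
def stripFlagsStepA (s : List Char × Bool) (letter : Char) : List Char × Bool :=
  let flag := if letter = '<' then true else s.2
  let p : Bool × List Char :=
    if flag ∧ (letter = '/' ∨ letter = ' ') then (false, s.1 ++ ['>']) else (flag, s.1)
  let flags := if p.1 then p.2 ++ [letter] else p.2
  let flag2 := if letter = '>' then false else p.1
  (flags, flag2)

def strip_flags (page : String) : String :=
  String.mk (page.toList.foldl stripFlagsStepA ([], false)).1

-- ===== PORT B =====
-- goB = the outer while-loop (skipping to the next '<'); innerB = the inner scan after the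
-- opening '<' (which the inner loop always copies on its first step, since '<' is no terminator).
mutual
def stripFlagsGoB : List Char → List Char
  | [] => []
  | c :: rest => if c = '<' then '<' :: stripFlagsInnerB rest else stripFlagsGoB rest

def stripFlagsInnerB : List Char → List Char
  | [] => []  -- j reached n: unterminated tag, no '>'
  | c :: rest =>
      if c = '/' ∨ c = ' ' ∨ c = '>' then '>' :: stripFlagsGoB rest
      else c :: stripFlagsInnerB rest
end

def strip_flags_alt (page : String) : String :=
  String.mk (stripFlagsGoB page.toList)

-- ===== PRECONDITION & SPEC =====
def Spec_strip_flags (page : String) (out : String) : Prop := out = strip_flags_alt page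
instance (page : String) (out : String) : Decidable (Spec_strip_flags page out) := by unfold Spec_strip_flags; infer_instance

-- ===== CLAIM (what is proved, stated in full; the proofs are below) =====
def Claim_equal_strip_flags : Prop := ∀ (page : String), Dom_strip_flags page → Spec_strip_flags page (strip_flags page)

-- ===== LEMMAS AND PROOFS =====
theorem stripFlags_fold_eq (l : List Char) :
    ∀ (acc : List Char) (flag : Bool),
      (l.foldl stripFlagsStepA (acc, flag)).1
        = acc ++ (if flag then stripFlagsInnerB l else stripFlagsGoB l) := by
  induction l with
  | nil => intro acc flag; cases flag <;> simp [stripFlagsGoB, stripFlagsInnerB]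
  | cons c rest ih =>
    intro acc flag
    cases flag with
    | false =>
      by_cases hlt : c = '<'
      · subst hlt
        simp [List.foldl, stripFlagsStepA, stripFlagsGoB, ih]
      · simp [List.foldl, stripFlagsStepA, hlt, stripFlagsGoB, ih]
    | true =>
      by_cases hterm : c = '/' ∨ c = ' ' ∨ c = '>'
      · rcases hterm with h | h | h <;> subst h <;>
          simp [List.foldl, stripFlagsStepA, stripFlagsInnerB, ih]
      · push Not at hterm
        obtain ⟨h1, h2, h3⟩ := hterm
        by_cases hlt : c = '<' <;>
          simp [List.foldl, stripFlagsStepA, stripFlagsInnerB, h1, h2, h3, hlt, ih]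

-- ===== VERDICT (by name: the statement is the Claim_ definition above) =====
theorem strip_flags_spec : Claim_equal_strip_flags := by
  intro page _
  unfold Spec_strip_flags strip_flags strip_flags_alt
  rw [stripFlags_fold_eq]
  simp
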